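-- pv_equiv track=rewrite | github.com/luke-hoffmann/Lab2_202_Spring26_Duran | lab2_2.py | jump_search_quadratic
-- ===== SOURCE A (Python) =====
-- from typing import List
--
-- def jump_search_quadratic(arr: List[int], target: int) -> int:
--     """Search sorted arr using jumps of sizes 1,4,9,16,... quadratic increments."""
--     n = len(arr)
--     if n == 0:
--         return -1
--
--     step = 1
--     prev = 0
--     steps = 0
--     # Jump phase
--     while prev < n and arr[prev] < target:
--         steps+=1
--         if arr[prev] == target:
--             return steps
--
--         next_index = prev + step
--         if next_index >= n:
--             break
--
--         if arr[next_index] >= target: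
--             # do linear search from prev+1 to next_index
--             for i in range(prev + 1, min(next_index + 1, n)):
--                 steps+=1
--                 if arr[i] == target:
--                     return steps
--                 if arr[i] > target:
--                     return -1
--             return -1
--
--         prev = next_index
--         step += 2  # next jump difference will grow to 3,5,7,... making square increments
--
--     # If we exit because we overshot the end or next_index beyond n, do linear from prev+1
--     for i in range(prev, n):
--         if arr[i] == target:
--             return steps
--         if arr[i] > target:
--             return -1
--
--     return -1
-- ===== SOURCE B (Python) =====
-- from typing import List
--
-- def _isqrt(x: int) -> int:
--     """Floor square root by binary search."""
--     lo, hi = 0, x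
--     while lo < hi:
--         mid = (lo + hi + 1) // 2
--         if mid * mid <= x:
--             lo = mid
--         else:
--             hi = mid - 1
--     return lo
--
-- def jump_search_quadratic(arr: List[int], target: int) -> int:
--     """Probe count of quadratic jump search on sorted arr, computed without scanning:
--     binary-search the leftmost index p with arr[p] >= target, then count one probe per
--     block head 0, 1, 4, ..., k*k (k = isqrt(p-1)) plus one probe per element of the
--     linear scan from k*k+1 up to p."""
--     n = len(arr)
--     lo, hi = 0, n
--     while lo < hi:
--         mid = (lo + hi) // 2
--         if arr[mid] < target:
--             lo = mid + 1
--         else: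
--             hi = mid
--     p = lo
--     if p == n or arr[p] != target:
--         return -1
--     if p == 0:
--         return 1
--     k = _isqrt(p - 1)
--     return (k + 1) + (p - k * k)
-- ===== Notes on version B (the rewrite author's own statement) =====
-- stated objective: alternative
-- what changed: Replaces the quadratic-jump scan plus linear scans by one binary search for the boundary index p with arr[p] >= target and a binary-search integer square root, computing the probe count arithmetically; Pre_ excludes only unsorted (non-partitioned) arrays that contain target, where A's scan order yields an accidental value.
-- intended difference: On partitioned arrays where the target is found at index 0 or found in the final linear scan entered because the next jump would pass the array end, A returns a count (0, resp. k+1) that omits the probes of that scan since steps is never incremented there, while B returns the full probe count (1, resp. k+1+(p-k*k)), which is the intended number of probes. — e.g. on jump_search_quadratic([5], 5): A returns 0, B returns 1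
-- outside the precondition, e.g. on jump_search_quadratic([-1, -2], -1): A returns 0, B returns -1
import Mathlib
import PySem

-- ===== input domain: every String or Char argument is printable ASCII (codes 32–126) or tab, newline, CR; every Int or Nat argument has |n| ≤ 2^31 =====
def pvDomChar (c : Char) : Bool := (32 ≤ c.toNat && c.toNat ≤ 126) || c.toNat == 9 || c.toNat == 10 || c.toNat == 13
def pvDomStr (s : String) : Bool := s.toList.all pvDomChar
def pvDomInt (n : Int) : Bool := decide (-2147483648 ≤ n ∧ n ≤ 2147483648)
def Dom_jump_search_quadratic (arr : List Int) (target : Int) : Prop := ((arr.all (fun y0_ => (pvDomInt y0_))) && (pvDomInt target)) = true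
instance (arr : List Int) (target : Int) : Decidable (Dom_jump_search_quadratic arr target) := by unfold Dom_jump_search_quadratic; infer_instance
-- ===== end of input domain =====

-- B replaces A's quadratic-jump scan by one binary search for the boundary index p plus a
-- binary-search integer square root, computing the probe count arithmetically (objective:
-- alternative); on the D_ inputs below B counts the probes of the final linear scan that
-- A's steps counter omits.

-- ===== PORT A =====
-- every index read in both ports is in range at its use site, so getD 0 is exact
def pvGet (arr : List Int) (i : Nat) : Int := arr.getD i 0

-- A's inner linear search: for i in range(lo, hi): steps += 1; ==/> checks
-- (fuel only bounds the recursion; callers pass enough that it never runs out)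
def pvLinInner (arr : List Int) (t : Int) (fuel : Nat) (i hi : Nat) (steps : Nat) : Int :=
  match fuel with
  | 0 => -1
  | fuel + 1 =>
    if i < hi then
      if pvGet arr i = t then ((steps + 1 : Nat) : Int)
      else if t < pvGet arr i then -1
      else pvLinInner arr t fuel (i + 1) hi (steps + 1)
    else -1

-- A's final linear scan: for i in range(prev, n): ==/> checks, steps unchanged
def pvLinFinal (arr : List Int) (t : Int) (fuel : Nat) (i n : Nat) (steps : Nat) : Int :=
  match fuel with
  | 0 => -1
  | fuel + 1 =>
    if i < n then
      if pvGet arr i = t then (steps : Int)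
      else if t < pvGet arr i then -1
      else pvLinFinal arr t fuel (i + 1) n steps
    else -1

-- A's jump-phase while loop
def pvJump (arr : List Int) (t : Int) (n : Nat) (fuel : Nat) (prev step steps : Nat) : Int :=
  match fuel with
  | 0 => pvLinFinal arr t (n + 1) prev n steps
  | fuel + 1 =>
    if prev < n ∧ pvGet arr prev < t then
      if pvGet arr prev = t then ((steps + 1 : Nat) : Int)
      else if n ≤ prev + step then pvLinFinal arr t (n + 1) prev n (steps + 1)
      else if t ≤ pvGet arr (prev + step) then
        pvLinInner arr t (n + 1) (prev + 1) (min (prev + step + 1) n) (steps + 1)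
      else pvJump arr t n fuel (prev + step) (step + 2) (steps + 1)
    else pvLinFinal arr t (n + 1) prev n steps

def jump_search_quadratic (arr : List Int) (target : Int) : Int :=
  if arr.length = 0 then -1
  else pvJump arr target arr.length arr.length 0 1 0

-- ===== PORT B =====
-- Source B's bisection loop: leftmost index with arr[i] >= target
def pvBisect (arr : List Int) (t : Int) (fuel : Nat) (lo hi : Nat) : Nat :=
  match fuel with
  | 0 => lo
  | fuel + 1 =>
    if lo < hi then
      if pvGet arr ((lo + hi) / 2) < t then pvBisect arr t fuel ((lo + hi) / 2 + 1) hi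
      else pvBisect arr t fuel lo ((lo + hi) / 2)
    else lo

-- Source B's _isqrt loop: largest k with k*k <= x
def pvIsqrt (x : Nat) (fuel : Nat) (lo hi : Nat) : Nat :=
  match fuel with
  | 0 => lo
  | fuel + 1 =>
    if lo < hi then
      if ((lo + hi + 1) / 2) * ((lo + hi + 1) / 2) ≤ x then pvIsqrt x fuel ((lo + hi + 1) / 2) hi
      else pvIsqrt x fuel lo ((lo + hi + 1) / 2 - 1)
    else lo

def jump_search_quadratic_alt (arr : List Int) (target : Int) : Int :=
  let n := arr.length
  let p := pvBisect arr target n 0 n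
  if p = n ∨ ¬ pvGet arr p = target then -1
  else if p = 0 then 1
  else
    let k := pvIsqrt (p - 1) (p - 1) 0 (p - 1)
    ((k : Int) + 1) + ((p : Int) - (k : Int) * (k : Int))

-- ===== PRECONDITION & SPEC =====
-- Pre_ excludes only arrays that are not partitioned around target (all elements < target
-- before all elements >= target) AND contain target — the docstring requires sorted input,
-- and on such unsorted input A's scan order yields an accidental value; every sorted array
-- is admitted, and so is every array not containing target (both programs return -1 there).
def Pre_jump_search_quadratic (arr : List Int) (target : Int) : Prop :=
  (∀ j, j < arr.length → ∀ i, i ≤ j → (arr.getD j 0 < target → arr.getD i 0 < target)) ∨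
  target ∉ arr
instance (arr : List Int) (target : Int) : Decidable (Pre_jump_search_quadratic arr target) := by
  unfold Pre_jump_search_quadratic; infer_instance

def pvWitness_jump_search_quadratic : List Int × Int := ([1, 2, 3], 2)

-- On partitioned arrays where the target is found at index 0 or found in the final linear
-- scan entered because the next jump would pass the array end, A returns a count (0, resp.
-- k+1) that omits the probes of that scan since `steps` is never incremented there, while B
-- returns the full probe count (1, resp. k+1+(p-k*k)), the intended number of probes.
def D_jump_search_quadratic (arr : List Int) (target : Int) : Prop :=
  (arr ≠ [] ∧ arr.getD 0 0 = target) ∨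
  (1 ≤ (arr.filter (fun x => decide (x < target))).length ∧
   (arr.filter (fun x => decide (x < target))).length < arr.length ∧
   arr.getD ((arr.filter (fun x => decide (x < target))).length) 0 = target ∧
   arr.length ≤ (Nat.sqrt ((arr.filter (fun x => decide (x < target))).length - 1) + 1) *
     (Nat.sqrt ((arr.filter (fun x => decide (x < target))).length - 1) + 1))
instance (arr : List Int) (target : Int) : Decidable (D_jump_search_quadratic arr target) := by
  unfold D_jump_search_quadratic; infer_instance

def Spec_jump_search_quadratic (arr : List Int) (target : Int) (out : Int) : Prop := ¬ D_jump_search_quadratic arr target → out = jump_search_quadratic_alt arr target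
instance (arr : List Int) (target : Int) (out : Int) : Decidable (Spec_jump_search_quadratic arr target out) := by unfold Spec_jump_search_quadratic; infer_instance

def pvDiffWitness_jump_search_quadratic : List Int × Int := ([5], 5)
def pvDiffWitnessOut_jump_search_quadratic : Int × Int := (0, 1)

-- ===== CLAIM (what is proved, stated in full; the proofs are below) =====
def Claim_unchanged_jump_search_quadratic : Prop := ∀ (arr : List Int) (target : Int), Dom_jump_search_quadratic arr target → Pre_jump_search_quadratic arr target → Spec_jump_search_quadratic arr target (jump_search_quadratic arr target)
def Claim_changed_jump_search_quadratic : Prop := Dom_jump_search_quadratic (pvDiffWitness_jump_search_quadratic.1) (pvDiffWitness_jump_search_quadratic.2) ∧ Pre_jump_search_quadratic (pvDiffWitness_jump_search_quadratic.1) (pvDiffWitness_jump_search_quadratic.2) ∧ D_jump_search_quadratic (pvDiffWitness_jump_search_quadratic.1) (pvDiffWitness_jump_search_quadratic.2) ∧ jump_search_quadratic (pvDiffWitness_jump_search_quadratic.1) (pvDiffWitness_jump_search_quadratic.2) = pvDiffWitnessOut_jump_search_quadratic.1 ∧ jump_search_quadratic_alt (pvDiffWitness_jump_search_quadratic.1)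 (pvDiffWitness_jump_search_quadratic.2) = pvDiffWitnessOut_jump_search_quadratic.2 ∧ pvDiffWitnessOut_jump_search_quadratic.1 ≠ pvDiffWitnessOut_jump_search_quadratic.2
def Claim_exact_jump_search_quadratic : Prop := ∀ (arr : List Int) (target : Int), Dom_jump_search_quadratic arr target → Pre_jump_search_quadratic arr target → D_jump_search_quadratic arr target → jump_search_quadratic arr target ≠ jump_search_quadratic_alt arr target

-- ===== LEMMAS AND PROOFS =====

-- A's loop never runs out of fuel: pvJump with the loop condition false is the final scan
lemma pvJump_exit (arr : List Int) (t : Int) (n fuel prev step steps : Nat)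
    (h : ¬ (prev < n ∧ pvGet arr prev < t)) :
    pvJump arr t n fuel prev step steps = pvLinFinal arr t (n + 1) prev n steps := by
  cases fuel with
  | zero => rfl
  | succ fuel => simp only [pvJump, if_neg h]

-- Source B's bisection finds the boundary between the <target prefix and the >=target suffix
lemma pvBisect_spec (arr : List Int) (t : Int)
    (hpart : ∀ j, j < arr.length → ∀ i, i ≤ j → (pvGet arr j < t → pvGet arr i < t)) :
    ∀ fuel lo hi, hi - lo ≤ fuel → lo ≤ hi → hi ≤ arr.length →
    (∀ i, i < lo → pvGet arr i < t) →
    (∀ i, hi ≤ i → i < arr.length → t ≤ pvGet arr i) →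
    lo ≤ pvBisect arr t fuel lo hi ∧ pvBisect arr t fuel lo hi ≤ hi ∧
    (∀ i, i < pvBisect arr t fuel lo hi → pvGet arr i < t) ∧
    (∀ i, pvBisect arr t fuel lo hi ≤ i → i < arr.length → t ≤ pvGet arr i) := by
  intro fuel
  induction fuel with
  | zero =>
    intro lo hi hd hlh hn hlow hhigh
    simp only [pvBisect]
    exact ⟨le_refl _, hlh, hlow, fun i hge hin => hhigh i (by omega) hin⟩
  | succ d ih =>
    intro lo hi hd hlh hn hlow hhigh
    by_cases hlt : lo < hi
    · rw [pvBisect, if_pos hlt]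
      by_cases hc : pvGet arr ((lo + hi) / 2) < t
      · rw [if_pos hc]
        obtain ⟨h1, h2, h3, h4⟩ := ih ((lo + hi) / 2 + 1) hi (by omega) (by omega) hn
          (fun i h2 => hpart ((lo + hi) / 2) (by omega) i (by omega) hc) hhigh
        exact ⟨by omega, h2, h3, h4⟩
      · rw [if_neg hc]
        obtain ⟨h1, h2, h3, h4⟩ := ih lo ((lo + hi) / 2) (by omega) (by omega) (by omega) hlow
          (fun i hge hin => not_lt.mp (fun hlt => hc (hpart i hin ((lo + hi) / 2) hge hlt)))
        exact ⟨h1, by omega, h3, h4⟩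
    · rw [pvBisect, if_neg hlt]
      exact ⟨le_refl _, by omega, hlow, fun i hge hin => hhigh i (by omega) hin⟩

-- Source B's _isqrt loop computes the floor square root of x
lemma pvIsqrt_spec (s : Nat) :
    ∀ fuel lo hi, hi - lo ≤ fuel → lo ≤ hi → lo * lo ≤ s → s < (hi + 1) * (hi + 1) →
    pvIsqrt s fuel lo hi * pvIsqrt s fuel lo hi ≤ s ∧
    s < (pvIsqrt s fuel lo hi + 1) * (pvIsqrt s fuel lo hi + 1) := by
  intro fuel
  induction fuel with
  | zero =>
    intro lo hi hd hlh h1 h2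
    have hlohi : lo = hi := by omega
    simp only [pvIsqrt]
    exact ⟨h1, by rw [hlohi]; exact h2⟩
  | succ d ih =>
    intro lo hi hd hlh h1 h2
    by_cases hlt : lo < hi
    · rw [pvIsqrt, if_pos hlt]
      by_cases hc : ((lo + hi + 1) / 2) * ((lo + hi + 1) / 2) ≤ s
      · rw [if_pos hc]
        exact ih _ _ (by omega) (by omega) hc h2
      · rw [if_neg hc]
        refine ih _ _ (by omega) (by omega) h1 ?_
        have he : (lo + hi + 1) / 2 - 1 + 1 = (lo + hi + 1) / 2 := by omega
        rw [he]
        omega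
    · have hlohi : lo = hi := by omega
      rw [pvIsqrt, if_neg hlt]
      exact ⟨h1, by rw [hlohi]; exact h2⟩

-- Nat.sqrt bounds in product form
lemma sqrt_mul_le (x : Nat) : Nat.sqrt x * Nat.sqrt x ≤ x := by
  have h := Nat.sqrt_le' x
  rwa [pow_two] at h

lemma lt_succ_sqrt_mul (x : Nat) : x < (Nat.sqrt x + 1) * (Nat.sqrt x + 1) := by
  have h := Nat.lt_succ_sqrt' x
  rwa [Nat.succ_eq_add_one, pow_two] at h

lemma sq_unique {a b s : Nat} (ha1 : a * a ≤ s) (ha2 : s < (a + 1) * (a + 1))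
    (hb1 : b * b ≤ s) (hb2 : s < (b + 1) * (b + 1)) : a = b := by
  rcases Nat.lt_trichotomy a b with h | h | h
  · have : (a + 1) * (a + 1) ≤ b * b := Nat.mul_le_mul h h
    omega
  · exact h
  · have : (b + 1) * (b + 1) ≤ a * a := Nat.mul_le_mul h h
    omega

-- Source B's _isqrt agrees with Nat.sqrt
lemma pvIsqrt_eq_sqrt (x : Nat) : pvIsqrt x x 0 x = Nat.sqrt x := by
  obtain ⟨h1, h2⟩ := pvIsqrt_spec x x 0 x (by omega) (by omega) (by omega)
    (by nlinarith [Nat.le_mul_of_pos_left (x + 1) (show 0 < x + 1 by omega)])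
  exact sq_unique h1 h2 (sqrt_mul_le x) (lt_succ_sqrt_mul x)

-- A's final scan returns steps iff the target sits at the boundary index p
lemma pvLinFinal_spec (arr : List Int) (t : Int) (p : Nat)
    (H1 : ∀ i, i < p → pvGet arr i < t)
    (H2 : ∀ i, p ≤ i → i < arr.length → t ≤ pvGet arr i)
    (hp : p ≤ arr.length) :
    ∀ fuel j steps, p - j < fuel → j ≤ p →
    pvLinFinal arr t fuel j arr.length steps =
      if p < arr.length ∧ pvGet arr p = t then (steps : Int) else -1 := by
  intro fuel
  induction fuel with
  | zero =>
    intro j steps hd hj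
    exact absurd hd (Nat.not_lt_zero _)
  | succ d ih =>
    intro j steps hd hj
    by_cases hjp : j = p
    · subst hjp
      by_cases hn : j < arr.length
      · rw [pvLinFinal, if_pos hn]
        by_cases he : pvGet arr j = t
        · rw [if_pos he, if_pos ⟨hn, he⟩]
        · have hgt : t < pvGet arr j := lt_of_le_of_ne (H2 j (le_refl _) hn) (fun h => he h.symm)
          rw [if_neg he, if_pos hgt, if_neg (fun h => he h.2)]
      · rw [pvLinFinal, if_neg hn, if_neg (fun h => hn h.1)]
    · have hjlt : j < p := by omega
      have hjn : j < arr.length := by omega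
      have hlt := H1 j hjlt
      rw [pvLinFinal, if_pos hjn, if_neg (fun h => absurd hlt (by rw [h]; exact lt_irrefl t)),
        if_neg (not_lt.mpr hlt.le)]
      exact ih (j + 1) steps (by omega) (by omega)

-- A's inner scan from j counts p - j + 1 further steps when the target is at p
lemma pvLinInner_spec (arr : List Int) (t : Int) (p hi : Nat)
    (H1 : ∀ i, i < p → pvGet arr i < t)
    (H2 : ∀ i, p ≤ i → i < arr.length → t ≤ pvGet arr i)
    (hph : p < hi) (hhn : hi ≤ arr.length) :
    ∀ fuel j steps, p - j < fuel → j ≤ p →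
    pvLinInner arr t fuel j hi steps =
      if pvGet arr p = t then ((steps + (p - j) + 1 : Nat) : Int) else -1 := by
  intro fuel
  induction fuel with
  | zero =>
    intro j steps hd hj
    exact absurd hd (Nat.not_lt_zero _)
  | succ d ih =>
    intro j steps hd hj
    by_cases hjp : j = p
    · subst hjp
      rw [pvLinInner, if_pos (by omega)]
      by_cases he : pvGet arr j = t
      · rw [if_pos he, if_pos he]
        norm_num
      · have hgt : t < pvGet arr j := lt_of_le_of_ne (H2 j (le_refl _) (by omega)) (fun h => he h.symm)
        rw [if_neg he, if_pos hgt, if_neg he]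
    · have hjlt : j < p := by omega
      have hlt := H1 j hjlt
      rw [pvLinInner, if_pos (by omega), if_neg (fun h => absurd hlt (by rw [h]; exact lt_irrefl t)),
        if_neg (not_lt.mpr hlt.le)]
      rw [ih (j + 1) (steps + 1) (by omega) (by omega)]
      have he : steps + 1 + (p - (j + 1)) + 1 = steps + (p - j) + 1 := by omega
      rw [he]

-- A's jump phase, entered at block head k*k, yields the closed form built from p and K
lemma pvJump_spec (arr : List Int) (t : Int) (p K : Nat)
    (H1 : ∀ i, i < p → pvGet arr i < t)
    (H2 : ∀ i, p ≤ i → i < arr.length → t ≤ pvGet arr i)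
    (hp : p ≤ arr.length) (hp1 : 1 ≤ p)
    (hK1 : K * K ≤ min arr.length p - 1)
    (hK2 : min arr.length p - 1 < (K + 1) * (K + 1)) :
    ∀ fuel k, k * k ≤ min arr.length p - 1 → min arr.length p - k * k ≤ fuel →
    pvJump arr t arr.length fuel (k * k) (2 * k + 1) k =
      (if p < arr.length ∧ pvGet arr p = t then
        (if arr.length ≤ (K + 1) * (K + 1) then ((K : Int) + 1)
         else (K : Int) + 1 + ((p : Int) - (K : Int) * (K : Int)))
       else -1) := by
  intro fuel
  induction fuel with
  | zero =>
    intro k hk hd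
    exfalso
    omega
  | succ d ih =>
    intro k hk hd
    have hm1 : 1 ≤ min arr.length p := by omega
    have hkn : k * k < arr.length := by omega
    have hkp : k * k < p := by omega
    have hnext : k * k + (2 * k + 1) = (k + 1) * (k + 1) := by ring
    have hblt := H1 _ hkp
    rw [pvJump, if_pos ⟨hkn, hblt⟩,
      if_neg (fun h => absurd hblt (by rw [h]; exact lt_irrefl t))]
    by_cases hbr : arr.length ≤ k * k + (2 * k + 1)
    · rw [if_pos hbr]
      have hkK : k = K := sq_unique hk (by omega) hK1 hK2
      subst hkK
      rw [pvLinFinal_spec arr t p H1 H2 hp (arr.length + 1) (k * k) (k + 1) (by omega) (by omega)]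
      rw [if_pos (show arr.length ≤ (k + 1) * (k + 1) by omega)]
      split_ifs with hf
      · push_cast
        ring
      · rfl
    · rw [if_neg hbr]
      have hnn : k * k + (2 * k + 1) < arr.length := by omega
      by_cases hge : t ≤ pvGet arr (k * k + (2 * k + 1))
      · rw [if_pos hge]
        have hple : p ≤ k * k + (2 * k + 1) := by
          by_contra h
          exact absurd hge (not_le.mpr (H1 _ (not_le.mp h)))
        have hmin : min (k * k + (2 * k + 1) + 1) arr.length = k * k + (2 * k + 1) + 1 := by omega
        rw [hmin, pvLinInner_spec arr t p (k * k + (2 * k + 1) + 1) H1 H2 (by omega) (by omega)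
          (arr.length + 1) (k * k + 1) (k + 1) (by omega) (by omega)]
        have hkK : k = K := sq_unique hk (by omega) hK1 hK2
        subst hkK
        rw [if_neg (show ¬ arr.length ≤ (k + 1) * (k + 1) by omega)]
        have hpn : p < arr.length := by omega
        by_cases he : pvGet arr p = t
        · rw [if_pos he, if_pos ⟨hpn, he⟩]
          have hc2 : k * k + 1 ≤ p := by omega
          push_cast [Nat.cast_sub hc2]
          ring
        · rw [if_neg he, if_neg (fun h => he h.2)]
      · rw [if_neg hge]
        have hlt2 : k * k + (2 * k + 1) < p := by
          by_contra h
          exact hge (H2 _ (not_lt.mp h) hnn)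
        have e2 : 2 * k + 1 + 2 = 2 * (k + 1) + 1 := by ring
        simp only [hnext, e2]
        exact ih (k + 1) (by omega) (by omega)

-- A's value, characterised from any boundary index p
lemma A_eq (arr : List Int) (t : Int) (p : Nat) (hp : p ≤ arr.length)
    (H1 : ∀ i, i < p → pvGet arr i < t)
    (H2 : ∀ i, p ≤ i → i < arr.length → t ≤ pvGet arr i) :
    jump_search_quadratic arr t =
      (if p < arr.length ∧ pvGet arr p = t then
        (if p = 0 then 0
         else if arr.length ≤ (Nat.sqrt (p - 1) + 1) * (Nat.sqrt (p - 1) + 1) then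
           ((Nat.sqrt (p - 1) : Int) + 1)
         else (Nat.sqrt (p - 1) : Int) + 1 +
           ((p : Int) - (Nat.sqrt (p - 1) : Int) * (Nat.sqrt (p - 1) : Int)))
       else -1) := by
  unfold jump_search_quadratic
  by_cases hn : arr.length = 0
  · rw [if_pos hn]
    have hp0 : p = 0 := by omega
    subst hp0
    rw [if_neg (fun h => (show ¬ (0:Nat) < arr.length by omega) h.1)]
  · rw [if_neg hn]
    by_cases hp0 : p = 0
    · subst hp0
      have hc : ¬ (0 < arr.length ∧ pvGet arr 0 < t) := by
        rintro ⟨h1, h2⟩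
        exact absurd h2 (not_lt.mpr (H2 0 (by omega) h1))
      rw [pvJump_exit arr t arr.length arr.length 0 1 0 hc,
        pvLinFinal_spec arr t 0 H1 H2 hp (arr.length + 1) 0 0 (by omega) (by omega)]
      split_ifs with hf h0
      · norm_num
      · omega
      · omega
      · rfl
    · by_cases hf : p < arr.length ∧ pvGet arr p = t
      · have hmin : min arr.length p = p := min_eq_right (le_of_lt hf.1)
        have hmain := pvJump_spec arr t p (Nat.sqrt (p - 1)) H1 H2 hp (by omega)
          (by rw [hmin]; exact sqrt_mul_le (p - 1))
          (by rw [hmin]; exact lt_succ_sqrt_mul (p - 1))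
          arr.length 0 (by omega) (by omega)
        norm_num at hmain
        rw [hmain, if_pos hf, if_pos hf, if_neg hp0]
      · have hmain := pvJump_spec arr t p (Nat.sqrt (min arr.length p - 1)) H1 H2 hp (by omega)
          (sqrt_mul_le _) (lt_succ_sqrt_mul _) arr.length 0 (by omega) (by omega)
        norm_num at hmain
        rw [hmain, if_neg hf, if_neg hf]

-- B's value, from the same boundary index
lemma B_eq (arr : List Int) (t : Int) (p : Nat) (hp : p ≤ arr.length)
    (hbis : pvBisect arr t arr.length 0 arr.length = p) :
    jump_search_quadratic_alt arr t =
      (if p < arr.length ∧ pvGet arr p = t then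
        (if p = 0 then 1
         else (Nat.sqrt (p - 1) : Int) + 1 +
           ((p : Int) - (Nat.sqrt (p - 1) : Int) * (Nat.sqrt (p - 1) : Int)))
       else -1) := by
  unfold jump_search_quadratic_alt
  simp only [hbis]
  by_cases hf : p < arr.length ∧ pvGet arr p = t
  · have hcond : ¬ (p = arr.length ∨ ¬ pvGet arr p = t) := by
      rintro (h | h)
      · omega
      · exact h hf.2
    rw [if_neg hcond, if_pos hf]
    by_cases hp0 : p = 0
    · rw [if_pos hp0, if_pos hp0]
    · rw [if_neg hp0, if_neg hp0, pvIsqrt_eq_sqrt]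
  · rw [if_pos ?_, if_neg hf]
    by_cases hpn : p = arr.length
    · exact Or.inl hpn
    · exact Or.inr (fun he => hf ⟨by omega, he⟩)

-- the length of the <target prefix is the boundary index
lemma filter_length_eq (t : Int) : ∀ (arr : List Int) (p : Nat), p ≤ arr.length →
    (∀ i, i < p → arr.getD i 0 < t) →
    (∀ i, p ≤ i → i < arr.length → t ≤ arr.getD i 0) →
    (arr.filter (fun x => decide (x < t))).length = p := by
  intro arr
  induction arr with
  | nil =>
    intro p hp _ _
    have hp0 : p = 0 := by simpa using hp
    subst hp0
    rfl
  | cons a l ih =>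
    intro p hp H1 H2
    cases p with
    | zero =>
      have ha : ¬ a < t := not_lt.mpr (H2 0 (by omega) (by simp))
      simp only [List.filter_cons, decide_eq_true_eq]
      rw [if_neg ha]
      exact ih 0 (by omega) (fun i hi => absurd hi (by omega))
        (fun i _ hi => H2 (i + 1) (by omega) (by simpa using hi))
    | succ q =>
      have ha : a < t := H1 0 (by omega)
      simp only [List.filter_cons, decide_eq_true_eq]
      rw [if_pos ha, List.length_cons]
      rw [ih q (by simpa using hp) (fun i hi => H1 (i + 1) (by omega))
        (fun i hi hil => H2 (i + 1) (by omega) (by simpa using hil))]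

-- when target does not occur, every probe misses
lemma getD_ne_of_notin (arr : List Int) (t : Int) (h : t ∉ arr) :
    ∀ i, i < arr.length → pvGet arr i ≠ t := by
  intro i hi heq
  apply h
  rw [← heq]
  unfold pvGet
  rw [List.getD_eq_getElem arr 0 hi]
  exact List.getElem_mem hi

lemma pvLinFinal_notin (arr : List Int) (t : Int)
    (H : ∀ i, i < arr.length → pvGet arr i ≠ t) :
    ∀ fuel i n steps, n ≤ arr.length → pvLinFinal arr t fuel i n steps = -1 := by
  intro fuel
  induction fuel with
  | zero => intro i n steps _; rfl
  | succ d ih =>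
    intro i n steps hn
    by_cases hin : i < n
    · rw [pvLinFinal, if_pos hin, if_neg (H i (by omega))]
      by_cases hgt : t < pvGet arr i
      · rw [if_pos hgt]
      · rw [if_neg hgt]
        exact ih (i + 1) n steps hn
    · rw [pvLinFinal, if_neg hin]

lemma pvLinInner_notin (arr : List Int) (t : Int)
    (H : ∀ i, i < arr.length → pvGet arr i ≠ t) :
    ∀ fuel i n steps, n ≤ arr.length → pvLinInner arr t fuel i n steps = -1 := by
  intro fuel
  induction fuel with
  | zero => intro i n steps _; rfl
  | succ d ih =>
    intro i n steps hn
    by_cases hin : i < n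
    · rw [pvLinInner, if_pos hin, if_neg (H i (by omega))]
      by_cases hgt : t < pvGet arr i
      · rw [if_pos hgt]
      · rw [if_neg hgt]
        exact ih (i + 1) n (steps + 1) hn
    · rw [pvLinInner, if_neg hin]

lemma pvJump_notin (arr : List Int) (t : Int)
    (H : ∀ i, i < arr.length → pvGet arr i ≠ t) :
    ∀ fuel prev step steps, pvJump arr t arr.length fuel prev step steps = -1 := by
  intro fuel
  induction fuel with
  | zero => intro prev step steps; exact pvLinFinal_notin arr t H _ prev _ steps (le_refl _)
  | succ d ih =>
    intro prev step steps
    by_cases hc : prev < arr.length ∧ pvGet arr prev < t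
    · rw [pvJump, if_pos hc, if_neg (H prev hc.1)]
      by_cases hbr : arr.length ≤ prev + step
      · rw [if_pos hbr]
        exact pvLinFinal_notin arr t H _ prev _ _ (le_refl _)
      · rw [if_neg hbr]
        by_cases hge : t ≤ pvGet arr (prev + step)
        · rw [if_pos hge]
          exact pvLinInner_notin arr t H _ (prev + 1) _ _ (min_le_right _ _)
        · rw [if_neg hge]
          exact ih (prev + step) (step + 2) (steps + 1)
    · rw [pvJump, if_neg hc]
      exact pvLinFinal_notin arr t H _ prev _ steps (le_refl _)

lemma pvBisect_le (arr : List Int) (t : Int) :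
    ∀ fuel lo hi, lo ≤ hi → pvBisect arr t fuel lo hi ≤ hi := by
  intro fuel
  induction fuel with
  | zero => intro lo hi h; exact h
  | succ d ih =>
    intro lo hi h
    by_cases hlt : lo < hi
    · rw [pvBisect, if_pos hlt]
      by_cases hc : pvGet arr ((lo + hi) / 2) < t
      · rw [if_pos hc]
        exact ih _ _ (by omega)
      · rw [if_neg hc]
        exact le_trans (ih _ _ (by omega)) (by omega)
    · rw [pvBisect, if_neg hlt]
      exact h

-- ===== VERDICT (by name: the statement is the Claim_ definition above) =====
theorem jump_search_quadratic_spec : Claim_unchanged_jump_search_quadratic := by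
  intro arr t _ hs
  unfold Spec_jump_search_quadratic
  intro hnD
  rcases hs with hs | hnotin
  swap
  · have H : ∀ i, i < arr.length → pvGet arr i ≠ t := getD_ne_of_notin arr t hnotin
    have hcond : pvBisect arr t arr.length 0 arr.length = arr.length ∨
        ¬ pvGet arr (pvBisect arr t arr.length 0 arr.length) = t := by
      by_cases hpn : pvBisect arr t arr.length 0 arr.length = arr.length
      · exact Or.inl hpn
      · have := pvBisect_le arr t arr.length 0 arr.length (by omega)
        exact Or.inr (H _ (by omega))
    simp only [jump_search_quadratic, jump_search_quadratic_alt]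
    rw [if_pos hcond]
    by_cases hn : arr.length = 0
    · rw [if_pos hn]
    · rw [if_neg hn, pvJump_notin arr t H arr.length 0 1 0]
  obtain ⟨-, hple, H1, H2⟩ := pvBisect_spec arr t (fun j hj i hij => hs j hj i hij)
    arr.length 0 arr.length (by omega) (by omega) (le_refl _)
    (fun i h => absurd h (Nat.not_lt_zero i))
    (fun i h1 h2 => absurd (lt_of_le_of_lt h1 h2) (lt_irrefl arr.length))
  rw [A_eq arr t _ hple H1 H2, B_eq arr t _ hple rfl]
  by_cases hf : pvBisect arr t arr.length 0 arr.length < arr.length ∧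
      pvGet arr (pvBisect arr t arr.length 0 arr.length) = t
  · rw [if_pos hf, if_pos hf]
    have hfl : (arr.filter (fun x => decide (x < t))).length =
        pvBisect arr t arr.length 0 arr.length :=
      filter_length_eq t arr _ hple H1 H2
    by_cases hp0 : pvBisect arr t arr.length 0 arr.length = 0
    · exfalso
      refine hnD (Or.inl ⟨?_, ?_⟩)
      · intro he
        rw [he] at hf
        simp at hf
      · have := hf.2
        rw [hp0] at this
        exact this
    · rw [if_neg hp0, if_neg hp0]
      by_cases hbr : arr.length ≤ (Nat.sqrt (pvBisect arr t arr.length 0 arr.length - 1) + 1) *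
          (Nat.sqrt (pvBisect arr t arr.length 0 arr.length - 1) + 1)
      · exfalso
        refine hnD (Or.inr ?_)
        rw [hfl]
        exact ⟨by omega, hf.1, hf.2, hbr⟩
      · rw [if_neg hbr]
  · rw [if_neg hf, if_neg hf]

theorem jump_search_quadratic_changed : Claim_changed_jump_search_quadratic := by
  unfold Claim_changed_jump_search_quadratic
  decide

theorem jump_search_quadratic_tight : Claim_exact_jump_search_quadratic := by
  intro arr t _ hs hD
  rcases hs with hs | hnotin
  swap
  · exfalso
    rcases hD with ⟨hne, h0⟩ | ⟨hq1, hqn, hqt, hqb⟩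
    · apply hnotin
      cases arr with
      | nil => exact absurd rfl hne
      | cons a l =>
        rw [show (a :: l).getD 0 0 = a from rfl] at h0
        rw [← h0]
        exact List.mem_cons_self
    · exact getD_ne_of_notin arr t hnotin _ hqn hqt
  obtain ⟨-, hple, H1, H2⟩ := pvBisect_spec arr t (fun j hj i hij => hs j hj i hij)
    arr.length 0 arr.length (by omega) (by omega) (le_refl _)
    (fun i h => absurd h (Nat.not_lt_zero i))
    (fun i h1 h2 => absurd (lt_of_le_of_lt h1 h2) (lt_irrefl arr.length))
  have hfl : (arr.filter (fun x => decide (x < t))).length =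
      pvBisect arr t arr.length 0 arr.length :=
    filter_length_eq t arr _ hple H1 H2
  rw [A_eq arr t _ hple H1 H2, B_eq arr t _ hple rfl]
  rcases hD with ⟨hne, h0⟩ | ⟨hq1, hqn, hqt, hqb⟩
  · have hn1 : 0 < arr.length := List.length_pos_iff.mpr hne
    have hp0 : pvBisect arr t arr.length 0 arr.length = 0 := by
      by_contra h
      have := H1 0 (by omega)
      rw [show pvGet arr 0 = arr.getD 0 0 from rfl, h0] at this
      exact lt_irrefl t this
    have hf : pvBisect arr t arr.length 0 arr.length < arr.length ∧
        pvGet arr (pvBisect arr t arr.length 0 arr.length) = t := by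
      rw [hp0]
      exact ⟨hn1, h0⟩
    rw [if_pos hf, if_pos hf, if_pos hp0, if_pos hp0]
    decide
  · rw [hfl] at hq1 hqn hqt hqb
    have hf : pvBisect arr t arr.length 0 arr.length < arr.length ∧
        pvGet arr (pvBisect arr t arr.length 0 arr.length) = t := ⟨hqn, hqt⟩
    have h0 : ¬ pvBisect arr t arr.length 0 arr.length = 0 := by omega
    rw [if_pos hf, if_pos hf, if_neg h0, if_neg h0, if_pos hqb]
    have hsq := sqrt_mul_le (pvBisect arr t arr.length 0 arr.length - 1)
    rw [← Nat.cast_mul]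
    omega
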